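-- pv_equiv track=rewrite | github.com/aberdichevskaia/catalytic-sites-annotation | baselines/homology_baselines/sequence_homology_baseline/baseline.py | compute_index_mapping
-- ===== SOURCE A (Python) =====
-- def compute_index_mapping(gapped_a, gapped_b):
--     """Map indices from ungapped A to ungapped B using two gapped strings."""
--     m, i, j = {}, 0, 0
--     for a, b in zip(gapped_a, gapped_b):
--         if a != "-" and b != "-":
--             m[i] = j; i += 1; j += 1
--         elif a != "-" and b == "-":
--             i += 1
--         elif a == "-" and b != "-":
--             j += 1
--     return m
-- ===== SOURCE B (Python) =====
-- def compute_index_mapping(gapped_a, gapped_b):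
--     """Map indices from ungapped A to ungapped B using two gapped strings."""
--     n = min(len(gapped_a), len(gapped_b))
--     # exclusive prefix counts of non-gap characters per column
--     ai = [0] * (n + 1)
--     bi = [0] * (n + 1)
--     for c in range(n):
--         ai[c + 1] = ai[c] + (gapped_a[c] != "-")
--         bi[c + 1] = bi[c] + (gapped_b[c] != "-")
--     return {ai[c]: bi[c] for c in range(n)
--             if gapped_a[c] != "-" and gapped_b[c] != "-"}
-- ===== Notes on version B (the rewrite author's own statement) =====
-- stated objective: alternative
-- what changed: Replaces the single stateful sweep carrying a dict and two counters with two phases: a table-building pass computing exclusive prefix counts of non-gap characters per column, then a dict comprehension over the columns where both strings are non-gap.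
import Mathlib
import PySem

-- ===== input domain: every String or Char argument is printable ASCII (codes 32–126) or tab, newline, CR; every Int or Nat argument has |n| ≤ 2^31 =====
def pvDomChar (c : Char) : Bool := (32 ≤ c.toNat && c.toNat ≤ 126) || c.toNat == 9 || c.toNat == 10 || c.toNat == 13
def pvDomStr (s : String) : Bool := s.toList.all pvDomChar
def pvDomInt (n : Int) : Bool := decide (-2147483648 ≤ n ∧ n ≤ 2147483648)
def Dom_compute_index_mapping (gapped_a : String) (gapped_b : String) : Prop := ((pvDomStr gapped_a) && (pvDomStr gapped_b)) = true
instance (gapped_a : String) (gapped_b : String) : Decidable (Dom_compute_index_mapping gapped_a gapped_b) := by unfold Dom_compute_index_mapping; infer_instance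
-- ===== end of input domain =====

-- B replaces A's single stateful sweep (dict + two counters) by a prefix-count table pass
-- followed by a comprehension pass over the columns; same O(n) cost, different decomposition.

-- ===== PORT A =====
-- one iteration of A's loop over a zipped pair of characters, state (m, i, j)
def pvStepA (s : PySem.Dict Int Int × Int × Int) (ab : Char × Char) :
    PySem.Dict Int Int × Int × Int :=
  if ab.1 ≠ '-' ∧ ab.2 ≠ '-' then (s.1.insert s.2.1 s.2.2, s.2.1 + 1, s.2.2 + 1)
  else if ab.1 ≠ '-' ∧ ab.2 = '-' then (s.1, s.2.1 + 1, s.2.2)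
  else if ab.1 = '-' ∧ ab.2 ≠ '-' then (s.1, s.2.1, s.2.2 + 1)
  else s

def compute_index_mapping (gapped_a : String) (gapped_b : String) : List (Int × Int) :=
  ((gapped_a.toList.zip gapped_b.toList).foldl pvStepA (PySem.Dict.empty, 0, 0)).1.items

-- ===== PORT B =====
-- exclusive prefix counts of non-gap characters, starting from k (the ai/bi tables of Source B)
def pvPrefix : List Char → Int → List Int
  | [], _ => []
  | c :: rest, k => k :: pvPrefix rest (k + if c ≠ '-' then 1 else 0)

def compute_index_mapping_alt (gapped_a : String) (gapped_b : String) : List (Int × Int) :=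
  let la := gapped_a.toList
  let lb := gapped_b.toList
  ((la.zip lb).zip ((pvPrefix la 0).zip (pvPrefix lb 0))).filterMap
    (fun p => if p.1.1 ≠ '-' ∧ p.1.2 ≠ '-' then some p.2 else none)

-- ===== PRECONDITION & SPEC =====
def Spec_compute_index_mapping (gapped_a : String) (gapped_b : String) (out : List (Int × Int)) : Prop := out = compute_index_mapping_alt gapped_a gapped_b
instance (gapped_a : String) (gapped_b : String) (out : List (Int × Int)) : Decidable (Spec_compute_index_mapping gapped_a gapped_b out) := by unfold Spec_compute_index_mapping; infer_instance

-- ===== CLAIM (what is proved, stated in full; the proofs are below) =====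
def Claim_equal_compute_index_mapping : Prop := ∀ (gapped_a : String) (gapped_b : String), Dom_compute_index_mapping gapped_a gapped_b → Spec_compute_index_mapping gapped_a gapped_b (compute_index_mapping gapped_a gapped_b)

-- ===== LEMMAS AND PROOFS =====

-- pvStepA on an explicit state, one lemma per branch of A's if/elif chain
lemma pvStepA_both (m : PySem.Dict Int Int) (i j : Int) (a b : Char)
    (ha : a ≠ '-') (hb : b ≠ '-') :
    pvStepA (m, i, j) (a, b) = (m.insert i j, i + 1, j + 1) := by simp [pvStepA, ha, hb]

lemma pvStepA_bgap (m : PySem.Dict Int Int) (i j : Int) (a b : Char)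
    (ha : a ≠ '-') (hb : b = '-') :
    pvStepA (m, i, j) (a, b) = (m, i + 1, j) := by simp [pvStepA, ha, hb]

lemma pvStepA_agap (m : PySem.Dict Int Int) (i j : Int) (a b : Char)
    (ha : a = '-') (hb : b ≠ '-') :
    pvStepA (m, i, j) (a, b) = (m, i, j + 1) := by simp [pvStepA, ha, hb]

lemma pvStepA_none (m : PySem.Dict Int Int) (i j : Int) (a b : Char)
    (ha : a = '-') (hb : b = '-') :
    pvStepA (m, i, j) (a, b) = (m, i, j) := by simp [pvStepA, ha, hb]

-- A's loop from state (m, i, j) appends exactly B's comprehension rows (keys in m all below i,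
-- so every insert is at a fresh key and appends).
lemma pvLoopA_items (la lb : List Char) (m : PySem.Dict Int Int) (i j : Int)
    (hm : ∀ p ∈ m.items, p.1 < i) :
    ((la.zip lb).foldl pvStepA (m, i, j)).1.items
      = m.items ++ ((la.zip lb).zip ((pvPrefix la i).zip (pvPrefix lb j))).filterMap
          (fun p => if p.1.1 ≠ '-' ∧ p.1.2 ≠ '-' then some p.2 else none) := by
  induction la generalizing lb m i j with
  | nil => simp
  | cons a as ih =>
    cases lb with
    | nil => simp
    | cons b bs =>
      have hcont : m.contains i = false := by
        rw [PySem.Dict.contains_eq_decide_mem_keys]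
        simp only [decide_eq_false_iff_not, PySem.Dict.keys, List.mem_map]
        rintro ⟨p, hp, rfl⟩
        exact absurd (hm p hp) (lt_irrefl _)
      by_cases ha : a = '-' <;> by_cases hb : b = '-'
      · rw [List.zip_cons_cons, List.foldl_cons, pvStepA_none m i j a b ha hb,
          ih bs m i j hm]
        simp [pvPrefix, ha, hb]
      · rw [List.zip_cons_cons, List.foldl_cons, pvStepA_agap m i j a b ha hb,
          ih bs m i (j + 1) hm]
        simp [pvPrefix, ha, hb]
      · rw [List.zip_cons_cons, List.foldl_cons, pvStepA_bgap m i j a b ha hb,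
          ih bs m (i + 1) j (fun p hp => lt_trans (hm p hp) (by omega))]
        simp [pvPrefix, ha, hb]
      · rw [List.zip_cons_cons, List.foldl_cons, pvStepA_both m i j a b ha hb,
          ih bs (m.insert i j) (i + 1) (j + 1) ?_]
        · rw [PySem.Dict.items_insert]
          simp [hcont, pvPrefix, ha, hb]
        · intro p hp
          rcases (PySem.Dict.mem_items_insert _ _ _ _).1 hp with h | ⟨h, _⟩
          · subst h; omega
          · exact lt_trans (hm p h) (by omega)

-- ===== VERDICT (by name: the statement is the Claim_ definition above) =====
theorem compute_index_mapping_spec : Claim_equal_compute_index_mapping := by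
  intro ga gb _
  show compute_index_mapping ga gb = compute_index_mapping_alt ga gb
  unfold compute_index_mapping compute_index_mapping_alt
  rw [pvLoopA_items _ _ _ 0 0 (by intro p hp; simp [PySem.Dict.empty] at hp)]
  simp [PySem.Dict.empty]
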